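-- pv_equiv track=rewrite | github.com/hcye/network-merge | format_txt.py | find_repeat_lines
-- ===== SOURCE A (Python) =====
-- def find_repeat_lines(lines):
--     repeate_lines = []
--     for i in lines:
--         n = 0
--         for j in lines:
--             if i == j:
--                 n = n + 1
--                 if n > 1:
--                     if i not in repeate_lines:
--                         repeate_lines.append(i)
--     return repeate_lines
-- ===== SOURCE B (Python) =====
-- def find_repeat_lines(lines):
--     counts = {}
--     for line in lines:
--         counts[line] = counts.get(line, 0) + 1
--     repeate_lines = []
--     seen = set()
--     for line in lines:
--         if counts[line] > 1 and line not in seen: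
--             repeate_lines.append(line)
--             seen.add(line)
--     return repeate_lines
-- ===== Notes on version B (the rewrite author's own statement) =====
-- stated objective: faster
-- what changed: Replaced the quadratic nested re-count of every line by a one-pass frequency table followed by a single linear scan with a seen-set, keeping first-occurrence order.
import Mathlib
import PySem

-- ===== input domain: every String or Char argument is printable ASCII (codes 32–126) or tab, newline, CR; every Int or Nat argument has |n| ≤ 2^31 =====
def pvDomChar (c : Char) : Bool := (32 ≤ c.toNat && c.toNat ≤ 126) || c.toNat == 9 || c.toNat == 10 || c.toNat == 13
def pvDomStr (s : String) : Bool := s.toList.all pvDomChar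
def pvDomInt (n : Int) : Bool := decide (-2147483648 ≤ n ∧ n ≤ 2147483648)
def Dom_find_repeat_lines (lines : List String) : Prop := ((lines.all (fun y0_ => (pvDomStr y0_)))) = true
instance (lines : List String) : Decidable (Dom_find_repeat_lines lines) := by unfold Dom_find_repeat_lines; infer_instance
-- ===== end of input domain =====

-- B replaces A's quadratic nested re-count by a one-pass frequency table plus one linear scan with a seen-set (faster).


-- ===== PORT A =====
-- body of the inner 'for j in lines' loop; state (n, repeate_lines)
def pvStepA (i : String) (st : Int × List String) (j : String) : Int × List String :=
  if i == j then
    let n := st.1 + 1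
    if n > 1 then
      if st.2.contains i then (n, st.2) else (n, st.2 ++ [i])
    else (n, st.2)
  else st

def pvInnerA (lines : List String) (i : String) (st : Int × List String) : Int × List String :=
  lines.foldl (pvStepA i) st

def find_repeat_lines (lines : List String) : List String :=
  lines.foldl (fun repeate_lines i => (pvInnerA lines i (0, repeate_lines)).2) []

-- ===== PORT B =====
def find_repeat_lines_alt (lines : List String) : List String :=
  let counts : PySem.Dict String Int :=
    lines.foldl (fun d line => d.insert line (d.getD line 0 + 1)) PySem.Dict.empty
  (lines.foldl (fun (st : List String × PySem.Set String) line =>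
      if counts.getD line 0 > 1 ∧ st.2.contains line = false then
        (st.1 ++ [line], PySem.Set.add st.2 line)
      else st) ([], PySem.Set.empty)).1

-- ===== PRECONDITION & SPEC =====
def Spec_find_repeat_lines (lines : List String) (out : List String) : Prop := out = find_repeat_lines_alt lines
instance (lines : List String) (out : List String) : Decidable (Spec_find_repeat_lines lines out) := by unfold Spec_find_repeat_lines; infer_instance

-- ===== CLAIM (what is proved, stated in full; the proofs are below) =====
def Claim_equal_find_repeat_lines : Prop := ∀ (lines : List String), Dom_find_repeat_lines lines → Spec_find_repeat_lines lines (find_repeat_lines lines)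

-- ===== LEMMAS AND PROOFS =====

-- canonical single step both ports reduce to: append i iff it occurs ≥ 2 times in lines and is not yet in acc
def pvCanonStep (lines : List String) (acc : List String) (i : String) : List String :=
  if 2 ≤ lines.count i ∧ acc.contains i = false then acc ++ [i] else acc

theorem pvInnerA_cons (j : String) (js : List String) (i : String) (st : Int × List String) :
    pvInnerA (j :: js) i st = pvInnerA js i (pvStepA i st j) := rfl

-- A's inner loop never changes the accumulator once i is already in it
theorem pvInnerA_of_contains (js : List String) (i : String) (n : Int) (acc : List String)
    (h : acc.contains i = true) : pvInnerA js i (n, acc) = (n + js.count i, acc) := by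
  induction js generalizing n with
  | nil => simp [pvInnerA]
  | cons j rest ih =>
    rw [pvInnerA_cons]
    by_cases hij : i = j
    · subst hij
      have hm : i ∈ acc := by simpa using h
      have hs : pvStepA i (n, acc) i = (n + 1, acc) := by
        simp [pvStepA, hm]
      rw [hs, ih (n + 1), List.count_cons_self]
      push_cast
      ring_nf
    · have hs : pvStepA i (n, acc) j = (n, acc) := by
        simp [pvStepA, hij]
      rw [hs, ih n, List.count_cons_of_ne (Ne.symm hij)]

-- A's inner loop when i is not yet in the accumulator, count started at n
theorem pvInnerA_of_not_contains (js : List String) (i : String) (n : Nat) (acc : List String)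
    (h : acc.contains i = false) :
    (pvInnerA js i ((n : Int), acc)).2 =
      if i ∈ js ∧ 2 ≤ n + js.count i then acc ++ [i] else acc := by
  induction js generalizing n with
  | nil => simp [pvInnerA]
  | cons j rest ih =>
    rw [pvInnerA_cons]
    have hm : i ∉ acc := by simpa using h
    by_cases hij : i = j
    · subst hij
      by_cases hn : 1 ≤ n
      · have hpos : ((n : Int) + 1 > 1) := by exact_mod_cast by omega
        have hs : pvStepA i ((n : Int), acc) i = ((n : Int) + 1, acc ++ [i]) := by
          simp [pvStepA, hm, hpos]
        rw [hs, pvInnerA_of_contains rest i _ _ (by simp)]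
        have hcond : i ∈ i :: rest ∧ 2 ≤ n + (i :: rest).count i := by
          refine ⟨by simp, ?_⟩
          rw [List.count_cons_self]
          omega
        rw [if_pos hcond]
      · have hn0 : n = 0 := by omega
        subst hn0
        have hs : pvStepA i (((0 : Nat) : Int), acc) i = (((1 : Nat) : Int), acc) := by
          norm_num [pvStepA]
        rw [hs, ih 1]
        by_cases hmem : i ∈ rest
        · have hc := List.count_pos_iff.mpr hmem
          have c1 : i ∈ rest ∧ 2 ≤ 1 + rest.count i := ⟨hmem, by omega⟩
          have c2 : i ∈ i :: rest ∧ 2 ≤ 0 + (i :: rest).count i := by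
            refine ⟨by simp, ?_⟩
            rw [List.count_cons_self]
            omega
          rw [if_pos c1, if_pos c2]
        · have hc : rest.count i = 0 := List.count_eq_zero.mpr hmem
          simp [hmem, List.count_cons_self, hc]
    · have hs : pvStepA i ((n : Int), acc) j = ((n : Int), acc) := by
        simp [pvStepA, hij]
      rw [hs, ih n, List.count_cons_of_ne (Ne.symm hij)]
      simp [hij]

-- A equals the canonical fold
theorem pvA_canon (lines : List String) :
    find_repeat_lines lines = lines.foldl (pvCanonStep lines) [] := by
  unfold find_repeat_lines
  apply PySem.List.foldl_congr_mem
  intro acc i hi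
  by_cases h : acc.contains i = true
  · have hm : i ∈ acc := by simpa using h
    rw [pvInnerA_of_contains lines i 0 acc h, pvCanonStep, if_neg (by simp [hm])]
  · have h' : acc.contains i = false := by simpa using h
    have hm : i ∉ acc := by simpa using h'
    have hrw := pvInnerA_of_not_contains lines i 0 acc h'
    simp only [Nat.cast_zero] at hrw
    rw [hrw, pvCanonStep]
    by_cases h2 : 2 ≤ List.count i lines
    · rw [if_pos ⟨hi, by omega⟩, if_pos ⟨h2, by simpa using hm⟩]
    · rw [if_neg (by intro hcc; exact h2 (by omega)), if_neg (by intro hcc; exact h2 hcc.1)]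

-- B's scan with (result, seen) where seen has the same members as result, vs the plain fold
theorem pvB_scan (cond : String → Prop) [DecidablePred cond] (ls : List String)
    (res : List String) (seen : PySem.Set String)
    (hinv : ∀ x, x ∈ seen ↔ x ∈ res) :
    (ls.foldl (fun (st : List String × PySem.Set String) line =>
        if cond line ∧ st.2.contains line = false then
          (st.1 ++ [line], PySem.Set.add st.2 line)
        else st) (res, seen)).1 =
    ls.foldl (fun acc line => if cond line ∧ acc.contains line = false then acc ++ [line] else acc) res := by
  induction ls generalizing res seen with
  | nil => rfl
  | cons l rest ih =>
    have hcl : (seen.contains l = false) ↔ (res.contains l = false) := by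
      simp [hinv l]
    simp only [List.foldl_cons, hcl]
    split_ifs with hc
    · have h2 : l ∉ res := by simpa using hc.2
      have hls : l ∉ seen := fun hl => h2 ((hinv l).mp hl)
      refine ih (res ++ [l]) (PySem.Set.add seen l) ?_
      intro x
      simp [PySem.Set.add, hls, hinv x]
    · exact ih res seen hinv

-- the frequency table holds exactly the count in lines
theorem pvCounts_eq (lines : List String) (line : String) :
    (lines.foldl (fun (d : PySem.Dict String Int) x => d.insert x (d.getD x 0 + 1)) PySem.Dict.empty).getD line 0
      = (lines.count line : Int) := by
  rw [PySem.Dict.foldl_insert_getD_add_one_eq_counter, PySem.Dict.getD_counter]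

theorem pvB_canon (lines : List String) :
    find_repeat_lines_alt lines = lines.foldl (pvCanonStep lines) [] := by
  unfold find_repeat_lines_alt
  rw [pvB_scan (fun line => (lines.foldl (fun (d : PySem.Dict String Int) x => d.insert x (d.getD x 0 + 1)) PySem.Dict.empty).getD line 0 > 1) lines [] PySem.Set.empty (fun _ => Iff.rfl)]
  apply PySem.List.foldl_congr_mem
  intro acc i _
  rw [pvCanonStep, pvCounts_eq]
  congr 1
  simp only [eq_iff_iff]
  constructor <;> rintro ⟨h1, h2⟩ <;> exact ⟨by exact_mod_cast by omega, h2⟩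

-- ===== VERDICT (by name: the statement is the Claim_ definition above) =====
theorem find_repeat_lines_spec : Claim_equal_find_repeat_lines := by
  intro lines _
  unfold Spec_find_repeat_lines
  rw [pvA_canon, pvB_canon]
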